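-- pv_equiv track=rewrite | github.com/mtayyab153/Python | Assignment5/task14.py | count_carry_operations
-- ===== SOURCE A (Python) =====
-- def count_carry_operations(num1, num2):
--     carry_count = 0  # Initialize the carry count to 0
--     carry = 0  # Initialize the carry to 0
--
--     while num1 > 0 or num2 > 0:
--         digit_sum = (num1 % 10) + (num2 % 10) + carry
--
--         if digit_sum >= 10:
--             carry = 1
--             carry_count += 1
--         else:
--             carry = 0
--
--         num1 //= 10
--         num2 //= 10
--
--     return carry_count
-- ===== SOURCE B (Python) =====
-- def count_carry_operations(num1, num2):
--     def digit_sum(n):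
--         s = 0
--         while n > 0:
--             s += n % 10
--             n //= 10
--         return s
--     return (digit_sum(num1) + digit_sum(num2) - digit_sum(num1 + num2)) // 9
-- ===== Notes on version B (the rewrite author's own statement) =====
-- stated objective: alternative
-- what changed: B replaces the carry-tracking per-column loop by the Legendre/Kummer closed form: the carry count equals (digit_sum(num1) + digit_sum(num2) - digit_sum(num1+num2)) // 9, so no carry variable and no per-column comparison remain.
-- outside the precondition, e.g. on count_carry_operations(-5, 777): A returns 3, B returns 0; on count_carry_operations(7, -5): A returns 1, B returns 0
import Mathlib
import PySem

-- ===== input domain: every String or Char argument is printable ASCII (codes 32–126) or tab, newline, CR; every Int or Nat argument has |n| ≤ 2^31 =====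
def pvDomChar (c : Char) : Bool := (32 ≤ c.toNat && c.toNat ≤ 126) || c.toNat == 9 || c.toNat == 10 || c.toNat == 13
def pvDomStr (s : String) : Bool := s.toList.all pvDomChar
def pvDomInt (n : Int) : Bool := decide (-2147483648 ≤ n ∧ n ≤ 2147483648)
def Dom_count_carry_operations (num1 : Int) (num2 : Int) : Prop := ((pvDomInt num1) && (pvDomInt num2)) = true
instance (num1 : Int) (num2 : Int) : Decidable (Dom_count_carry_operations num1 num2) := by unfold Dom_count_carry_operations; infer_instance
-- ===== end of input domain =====

-- B replaces A's carry-tracking per-column loop by the Legendre/Kummer digit-sum identity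
-- (digit_sum num1 + digit_sum num2 - digit_sum (num1+num2)) // 9; objective: alternative algorithm.

-- termination helpers cited by name in the ports' decreasing_by (keeps the WF proof terms small)
theorem pvFd10_le (n : Int) : (PySem.Int.floordiv n 10).toNat ≤ n.toNat := by
  rw [PySem.Int.floordiv_eq_ediv_of_pos (by norm_num : (0:Int) < 10)]; omega

theorem pvFd10_lt {n : Int} (h : n > 0) : (PySem.Int.floordiv n 10).toNat < n.toNat := by
  rw [PySem.Int.floordiv_eq_ediv_of_pos (by norm_num : (0:Int) < 10)]; omega

-- ===== PORT A =====
-- A's while loop: state (num1, num2, carry, carry_count)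
def ccoLoop (num1 : Int) (num2 : Int) (carry : Int) (cnt : Int) : Int :=
  if num1 > 0 ∨ num2 > 0 then
    let d := PySem.Int.mod num1 10 + PySem.Int.mod num2 10 + carry
    if d ≥ 10 then
      ccoLoop (PySem.Int.floordiv num1 10) (PySem.Int.floordiv num2 10) 1 (cnt + 1)
    else
      ccoLoop (PySem.Int.floordiv num1 10) (PySem.Int.floordiv num2 10) 0 cnt
  else cnt
termination_by num1.toNat + num2.toNat
decreasing_by
  all_goals
    rcases (by assumption : num1 > 0 ∨ num2 > 0) with h | h
    · exact Nat.add_lt_add_of_lt_of_le (pvFd10_lt h) (pvFd10_le _)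
    · exact Nat.add_lt_add_of_le_of_lt (pvFd10_le _) (pvFd10_lt h)

def count_carry_operations (num1 : Int) (num2 : Int) : Int :=
  ccoLoop num1 num2 0 0

-- ===== PORT B =====
-- Source B's inner digit_sum: while n > 0: s += n % 10; n //= 10
def digitSumLoop (n : Int) (s : Int) : Int :=
  if n > 0 then digitSumLoop (PySem.Int.floordiv n 10) (s + PySem.Int.mod n 10) else s
termination_by n.toNat
decreasing_by
  exact pvFd10_lt (by assumption)

def count_carry_operations_alt (num1 : Int) (num2 : Int) : Int :=
  PySem.Int.floordiv (digitSumLoop num1 0 + digitSumLoop num2 0 - digitSumLoop (num1 + num2) 0) 9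

-- ===== PRECONDITION & SPEC =====
-- Pre_ excludes mixed-sign pairs (one argument strictly negative, the other strictly positive):
-- there A's loop feeds Python's floored negatives (-1 % 10 = 9, -1 // 10 = -1) into the carry
-- count — a value nobody would specify for carries of an addition — while B's digit-sum identity
-- is the intended meaning only for addends that are not of opposite sign.
def Pre_count_carry_operations (num1 : Int) (num2 : Int) : Prop :=
  (0 ≤ num1 ∧ 0 ≤ num2) ∨ (num1 ≤ 0 ∧ num2 ≤ 0)
instance (num1 : Int) (num2 : Int) : Decidable (Pre_count_carry_operations num1 num2) := by
  unfold Pre_count_carry_operations; infer_instance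

def pvWitness_count_carry_operations : Int × Int := (19, 5)

def Spec_count_carry_operations (num1 : Int) (num2 : Int) (out : Int) : Prop := out = count_carry_operations_alt num1 num2
instance (num1 : Int) (num2 : Int) (out : Int) : Decidable (Spec_count_carry_operations num1 num2 out) := by unfold Spec_count_carry_operations; infer_instance

-- ===== CLAIM (what is proved, stated in full; the proofs are below) =====
def Claim_equal_count_carry_operations : Prop := ∀ (num1 : Int) (num2 : Int), Dom_count_carry_operations num1 num2 → Pre_count_carry_operations num1 num2 → Spec_count_carry_operations num1 num2 (count_carry_operations num1 num2)

-- ===== LEMMAS AND PROOFS =====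

-- digitSumLoop with accumulator: the accumulator splits off.
theorem digitSumLoop_acc_aux : ∀ (m : Nat) (n s : Int), n.toNat ≤ m → digitSumLoop n s = s + digitSumLoop n 0 := by
  intro m
  induction m with
  | zero =>
    intro n s h
    have hnp : ¬ n > 0 := by omega
    rw [digitSumLoop, if_neg hnp, digitSumLoop, if_neg hnp]; ring
  | succ m ih =>
    intro n s h
    by_cases hp : n > 0
    · have hlt : (PySem.Int.floordiv n 10).toNat ≤ m := by
        rw [PySem.Int.floordiv_eq_ediv_of_pos (by norm_num : (0:Int) < 10)]; omega
      have e0 : digitSumLoop n 0 = PySem.Int.mod n 10 + digitSumLoop (PySem.Int.floordiv n 10) 0 := by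
        rw [digitSumLoop, if_pos hp, ih _ _ hlt]; ring
      rw [digitSumLoop, if_pos hp, ih _ _ hlt, e0]; ring
    · rw [digitSumLoop, if_neg hp, digitSumLoop, if_neg hp]; ring

theorem digitSumLoop_acc (n : Int) (s : Int) : digitSumLoop n s = s + digitSumLoop n 0 :=
  digitSumLoop_acc_aux n.toNat n s le_rfl

theorem digitSumLoop_nonpos {n : Int} (h : n ≤ 0) (s : Int) : digitSumLoop n s = s := by
  rw [digitSumLoop, if_neg (by omega)]

-- One digit peeled off, valid for all n ≥ 0 (n = 0 gives 0 = 0 + 0).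
theorem digitSum_step {n : Int} (h : 0 ≤ n) :
    digitSumLoop n 0 = n % 10 + digitSumLoop (n / 10) 0 := by
  rcases lt_or_eq_of_le h with hpos | hz
  · rw [digitSumLoop, if_pos hpos,
        PySem.Int.floordiv_eq_ediv_of_pos (by norm_num : (0:Int) < 10),
        PySem.Int.mod_eq_emod_of_pos (by norm_num : (0:Int) < 10),
        digitSumLoop_acc]
    ring
  · subst hz; simp [digitSumLoop_nonpos]

-- Kummer invariant for A's loop on non-negative inputs with carry c ∈ {0,1}.
theorem ccoLoop_kummer (n1 n2 c k : Int) (h1 : 0 ≤ n1) (h2 : 0 ≤ n2) (hc : c = 0 ∨ c = 1) :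
    9 * ccoLoop n1 n2 c k =
      9 * k + digitSumLoop n1 0 + digitSumLoop n2 0 + c - digitSumLoop (n1 + n2 + c) 0 := by
  induction n1, n2, c, k using ccoLoop.induct with
  | case1 n1 n2 c k hcond d hd ih =>
    rw [ccoLoop, if_pos hcond]
    have hd' : PySem.Int.mod n1 10 + PySem.Int.mod n2 10 + c ≥ 10 := hd
    rw [PySem.Int.mod_eq_emod_of_pos (by norm_num : (0:Int) < 10),
        PySem.Int.mod_eq_emod_of_pos (by norm_num : (0:Int) < 10)] at hd'
    simp only [PySem.Int.floordiv_eq_ediv_of_pos (by norm_num : (0:Int) < 10),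
               PySem.Int.mod_eq_emod_of_pos (by norm_num : (0:Int) < 10)]
    rw [if_pos hd']
    have h1' : (0:Int) ≤ n1 / 10 := by omega
    have h2' : (0:Int) ≤ n2 / 10 := by omega
    simp only [PySem.Int.floordiv_eq_ediv_of_pos (by norm_num : (0:Int) < 10)] at ih
    rw [ih h1' h2' (Or.inr trivial)]
    have e1 := digitSum_step h1
    have e2 := digitSum_step h2
    have e3 := digitSum_step (show (0:Int) ≤ n1 + n2 + c by omega)
    have hq : (n1 + n2 + c) / 10 = n1 / 10 + n2 / 10 + 1 := by omega
    have hr : (n1 + n2 + c) % 10 = n1 % 10 + n2 % 10 + c - 10 := by omega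
    rw [e1, e2, e3, hq, hr]
    ring
  | case2 n1 n2 c k hcond d hd ih =>
    rw [ccoLoop, if_pos hcond]
    have hd0 : PySem.Int.mod n1 10 + PySem.Int.mod n2 10 + c ≥ 10 → False := hd
    have hd' : ¬ (n1 % 10 + n2 % 10 + c ≥ 10) := by
      intro h
      exact hd0 (by
        rw [PySem.Int.mod_eq_emod_of_pos (by norm_num : (0:Int) < 10),
            PySem.Int.mod_eq_emod_of_pos (by norm_num : (0:Int) < 10)]
        exact h)
    simp only [PySem.Int.floordiv_eq_ediv_of_pos (by norm_num : (0:Int) < 10),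
               PySem.Int.mod_eq_emod_of_pos (by norm_num : (0:Int) < 10)]
    rw [if_neg hd']
    have h1' : (0:Int) ≤ n1 / 10 := by omega
    have h2' : (0:Int) ≤ n2 / 10 := by omega
    simp only [PySem.Int.floordiv_eq_ediv_of_pos (by norm_num : (0:Int) < 10)] at ih
    rw [ih h1' h2' (Or.inl trivial)]
    have e1 := digitSum_step h1
    have e2 := digitSum_step h2
    have e3 := digitSum_step (show (0:Int) ≤ n1 + n2 + c by omega)
    have hq : (n1 + n2 + c) / 10 = n1 / 10 + n2 / 10 := by
      rw [PySem.Int.mod_eq_emod_of_pos (by norm_num : (0:Int) < 10),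
          PySem.Int.mod_eq_emod_of_pos (by norm_num : (0:Int) < 10)] at hd0
      omega
    have hr : (n1 + n2 + c) % 10 = n1 % 10 + n2 % 10 + c := by
      rw [PySem.Int.mod_eq_emod_of_pos (by norm_num : (0:Int) < 10),
          PySem.Int.mod_eq_emod_of_pos (by norm_num : (0:Int) < 10)] at hd0
      omega
    rw [e1, e2, e3, hq, hr]
    ring_nf
  | case3 n1 n2 c k hcond =>
    rw [ccoLoop, if_neg hcond]
    have hn1 : n1 = 0 := by omega
    have hn2 : n2 = 0 := by omega
    subst hn1; subst hn2
    rcases hc with hc | hc <;> subst hc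
    · simp [digitSumLoop_nonpos]
    · rw [digitSumLoop_nonpos (by norm_num),
          show (0:Int) + 0 + 1 = 1 by ring,
          digitSum_step (by norm_num : (0:Int) ≤ 1)]
      norm_num [digitSumLoop_nonpos]

theorem floordiv_nine_mul (a : Int) : PySem.Int.floordiv (9 * a) 9 = a := by
  rw [PySem.Int.floordiv_eq_ediv_of_pos (by norm_num : (0:Int) < 9)]
  exact Int.mul_ediv_cancel_left a (by norm_num)

-- ===== VERDICT (by name: the statement is the Claim_ definition above) =====
theorem count_carry_operations_spec : Claim_equal_count_carry_operations := by
  intro num1 num2 _ hpre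
  unfold Spec_count_carry_operations count_carry_operations count_carry_operations_alt
  rcases hpre with ⟨h1, h2⟩ | ⟨h1, h2⟩
  · have hk := ccoLoop_kummer num1 num2 0 0 h1 h2 (Or.inl rfl)
    have : digitSumLoop num1 0 + digitSumLoop num2 0 - digitSumLoop (num1 + num2) 0
        = 9 * ccoLoop num1 num2 0 0 := by
      rw [show num1 + num2 + 0 = num1 + num2 by ring] at hk
      omega
    rw [this, floordiv_nine_mul]
  · rw [ccoLoop, if_neg (by omega),
        digitSumLoop_nonpos h1, digitSumLoop_nonpos h2,
        digitSumLoop_nonpos (by omega)]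
    norm_num [floordiv_nine_mul]
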